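-- pv_equiv track=rewrite | github.com/F1l1p11/FINKI--AI | Fourth lab/first_mod2.py | cells_between
-- ===== SOURCE A (Python) =====
-- def cells_between(pos1, pos2):
--     """Return all cells between pos1 and pos2 (exclusive) if they're in same row/col"""
--     r1, c1 = pos1
--     r2, c2 = pos2
--
--     cells = []
--
--     # Same row
--     if r1 == r2:
--         min_c, max_c = min(c1, c2), max(c1, c2)
--         for c in range(min_c + 1, max_c):
--             cells.append((r1, c))
--     # Same column
--     elif c1 == c2:
--         min_r, max_r = min(r1, r2), max(r1, r2)
--         for r in range(min_r + 1, max_r):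
--             cells.append((r, c1))
--
--     return cells
-- ===== SOURCE B (Python) =====
-- def cells_between(pos1, pos2):
--     """Return all cells between pos1 and pos2 (exclusive) if they're in same row/col"""
--     r1, c1 = pos1
--     r2, c2 = pos2
--     dr = (r2 > r1) - (r2 < r1)
--     dc = (c2 > c1) - (c2 < c1)
--     if dr != 0 and dc != 0:
--         return []
--     cells = []
--     r, c = r1 + dr, c1 + dc
--     while (r, c) != (r2, c2):
--         cells.append((r, c))
--         r += dr
--         c += dc
--     return cells if dr + dc >= 0 else cells[::-1]
-- ===== Notes on version B (the rewrite author's own statement) =====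
-- stated objective: alternative
-- what changed: Instead of A's min/max plus range enumeration in two axis-specific branches, B computes a unit step vector (sign of the delta per axis), walks cell by cell from pos1 toward pos2 collecting intermediate cells, and reverses the collected list when the walk went in decreasing direction.
import Mathlib
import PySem

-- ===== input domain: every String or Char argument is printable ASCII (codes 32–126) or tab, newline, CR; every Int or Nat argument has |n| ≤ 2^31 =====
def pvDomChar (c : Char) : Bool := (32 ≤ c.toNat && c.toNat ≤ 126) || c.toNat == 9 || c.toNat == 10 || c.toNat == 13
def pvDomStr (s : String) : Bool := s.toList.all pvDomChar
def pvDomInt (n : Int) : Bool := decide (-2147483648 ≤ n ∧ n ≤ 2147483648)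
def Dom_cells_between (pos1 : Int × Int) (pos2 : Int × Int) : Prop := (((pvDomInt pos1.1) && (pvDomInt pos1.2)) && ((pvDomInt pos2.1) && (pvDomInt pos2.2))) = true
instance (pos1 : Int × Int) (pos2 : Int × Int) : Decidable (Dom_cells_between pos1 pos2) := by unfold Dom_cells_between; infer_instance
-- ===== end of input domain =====

-- B replaces A's two min/max+range branches by a unit-step walk from pos1 toward pos2 (reversed when walking downward); objective: alternative.


-- ===== PORT A =====
def cells_between (pos1 : Int × Int) (pos2 : Int × Int) : List (Int × Int) :=
  let r1 := pos1.1; let c1 := pos1.2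
  let r2 := pos2.1; let c2 := pos2.2
  let cells : List (Int × Int) := []
  if r1 = r2 then
    let min_c := min c1 c2; let max_c := max c1 c2
    (PySem.List.pyRange (min_c + 1) max_c 1).foldl (fun cells c => cells ++ [(r1, c)]) cells
  else if c1 = c2 then
    let min_r := min r1 r2; let max_r := max r1 r2
    (PySem.List.pyRange (min_r + 1) max_r 1).foldl (fun cells r => cells ++ [(r, c1)]) cells
  else
    cells

-- ===== PORT B =====
-- the while loop of Source B; the Nat fuel (|r2-r1|+|c2-c1|, exactly the walk's length) only makes it total
def cbWalk : Nat → Int → Int → Int → Int → Int → Int → List (Int × Int)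
  | 0, _, _, _, _, _, _ => []
  | Nat.succ n, r, c, r2, c2, dr, dc =>
    if r = r2 ∧ c = c2 then [] else (r, c) :: cbWalk n (r + dr) (c + dc) r2 c2 dr dc

def cells_between_alt (pos1 : Int × Int) (pos2 : Int × Int) : List (Int × Int) :=
  let r1 := pos1.1; let c1 := pos1.2
  let r2 := pos2.1; let c2 := pos2.2
  let dr : Int := (if r1 < r2 then 1 else 0) - (if r2 < r1 then 1 else 0)
  let dc : Int := (if c1 < c2 then 1 else 0) - (if c2 < c1 then 1 else 0)
  if dr ≠ 0 ∧ dc ≠ 0 then []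
  else
    let cells := cbWalk ((r2 - r1).natAbs + (c2 - c1).natAbs) (r1 + dr) (c1 + dc) r2 c2 dr dc
    if 0 ≤ dr + dc then cells else cells.reverse

-- ===== PRECONDITION & SPEC =====
def Spec_cells_between (pos1 : Int × Int) (pos2 : Int × Int) (out : List (Int × Int)) : Prop := out = cells_between_alt pos1 pos2
instance (pos1 : Int × Int) (pos2 : Int × Int) (out : List (Int × Int)) : Decidable (Spec_cells_between pos1 pos2 out) := by unfold Spec_cells_between; infer_instance

-- ===== CLAIM (what is proved, stated in full; the proofs are below) =====
def Claim_equal_cells_between : Prop := ∀ (pos1 : Int × Int) (pos2 : Int × Int), Dom_cells_between pos1 pos2 → Spec_cells_between pos1 pos2 (cells_between pos1 pos2)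

-- ===== LEMMAS AND PROOFS =====

-- walking right along a row with fuel k+1 until hitting c+k produces the increasing range
theorem cbWalk_row_pos (k : Nat) : ∀ (r c : Int),
    cbWalk (k+1) r c r (c + k) 0 1 = (PySem.List.pyRange c (c + k) 1).map (fun v => (r, v)) := by
  induction k with
  | zero => intro r c; simp [cbWalk, PySem.List.pyRange_one_eq_nil]
  | succ n ih =>
    intro r c
    have e : ((n+1:Nat):Int) = (n:Int)+1 := by push_cast; ring
    rw [e, PySem.List.pyRange_one_cons (by omega : c < c + ((n:Int)+1))]
    show cbWalk (n+1+1) r c r (c + ((n:Int)+1)) 0 1 = _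
    rw [cbWalk, if_neg (by omega : ¬ (r = r ∧ c = c + ((n:Int)+1)))]
    simp only [add_zero]
    rw [show c + ((n:Int)+1) = (c+1) + (n:Int) from by ring, ih r (c+1)]
    simp

-- walking left along a row produces the decreasing (step -1) range
theorem cbWalk_row_neg (k : Nat) : ∀ (r c : Int),
    cbWalk (k+1) r c r (c - k) 0 (-1) = (PySem.List.pyRange c (c - k) (-1)).map (fun v => (r, v)) := by
  induction k with
  | zero => intro r c; simp [cbWalk, PySem.List.pyRange_neg_one_eq_nil]
  | succ n ih =>
    intro r c
    have e : ((n+1:Nat):Int) = (n:Int)+1 := by push_cast; ring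
    rw [e, PySem.List.pyRange_neg_one_cons (by omega : c - ((n:Int)+1) < c)]
    show cbWalk (n+1+1) r c r (c - ((n:Int)+1)) 0 (-1) = _
    rw [cbWalk, if_neg (by omega : ¬ (r = r ∧ c = c - ((n:Int)+1)))]
    simp only [add_zero]
    rw [show c + (-1) = c - 1 from by ring,
        show c - ((n:Int)+1) = (c-1) - (n:Int) from by ring, ih r (c-1)]
    simp

-- walking down a column
theorem cbWalk_col_pos (k : Nat) : ∀ (c r : Int),
    cbWalk (k+1) r c (r + k) c 1 0 = (PySem.List.pyRange r (r + k) 1).map (fun v => (v, c)) := by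
  induction k with
  | zero => intro c r; simp [cbWalk, PySem.List.pyRange_one_eq_nil]
  | succ n ih =>
    intro c r
    have e : ((n+1:Nat):Int) = (n:Int)+1 := by push_cast; ring
    rw [e, PySem.List.pyRange_one_cons (by omega : r < r + ((n:Int)+1))]
    show cbWalk (n+1+1) r c (r + ((n:Int)+1)) c 1 0 = _
    rw [cbWalk, if_neg (by omega : ¬ (r = r + ((n:Int)+1) ∧ c = c))]
    simp only [add_zero]
    rw [show r + ((n:Int)+1) = (r+1) + (n:Int) from by ring, ih c (r+1)]
    simp

-- walking up a column
theorem cbWalk_col_neg (k : Nat) : ∀ (c r : Int),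
    cbWalk (k+1) r c (r - k) c (-1) 0 = (PySem.List.pyRange r (r - k) (-1)).map (fun v => (v, c)) := by
  induction k with
  | zero => intro c r; simp [cbWalk, PySem.List.pyRange_neg_one_eq_nil]
  | succ n ih =>
    intro c r
    have e : ((n+1:Nat):Int) = (n:Int)+1 := by push_cast; ring
    rw [e, PySem.List.pyRange_neg_one_cons (by omega : r - ((n:Int)+1) < r)]
    show cbWalk (n+1+1) r c (r - ((n:Int)+1)) c (-1) 0 = _
    rw [cbWalk, if_neg (by omega : ¬ (r = r - ((n:Int)+1) ∧ c = c))]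
    simp only [add_zero]
    rw [show r + (-1) = r - 1 from by ring,
        show r - ((n:Int)+1) = (r-1) - (n:Int) from by ring, ih c (r-1)]
    simp

-- ===== VERDICT (by name: the statement is the Claim_ definition above) =====
theorem cells_between_spec : Claim_equal_cells_between := by
  intro ⟨r1, c1⟩ ⟨r2, c2⟩ _
  unfold Spec_cells_between cells_between cells_between_alt
  dsimp only
  by_cases h1 : r1 = r2
  · subst h1
    rw [if_pos rfl, PySem.List.foldl_append_singleton_eq_map]
    rcases lt_trichotomy c1 c2 with h | h | h
    · -- walk right; fuel = c2 - c1, k = c2 - c1 - 1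
      have hk : ∃ k : Nat, c2 = (c1 + 1) + (k:Int) ∧ (c2 - c1).natAbs = k + 1 := by
        refine ⟨(c2 - c1 - 1).toNat, by omega, by omega⟩
      obtain ⟨k, hc2, hfuel⟩ := hk
      have hdr : ((if r1 < r1 then (1:Int) else 0) - (if r1 < r1 then 1 else 0)) = 0 := by simp
      have hdc1 : (if c1 < c2 then (1:Int) else 0) = 1 := if_pos h
      have hdc2 : (if c2 < c1 then (1:Int) else 0) = 0 := if_neg (by omega)
      rw [if_neg (by simp)]
      simp only [hdr, hdc1, hdc2]
      norm_num
      rw [hfuel, hc2, cbWalk_row_pos k r1 (c1+1)]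
      rw [min_eq_left (by omega : c1 ≤ c1 + 1 + (k:Int)),
          max_eq_right (by omega : c1 ≤ c1 + 1 + (k:Int))]
    · -- equal positions
      subst h
      simp [cbWalk, PySem.List.pyRange_one_eq_nil]
    · -- walk left; reverse at the end
      have hk : ∃ k : Nat, c2 = (c1 - 1) - (k:Int) ∧ (c2 - c1).natAbs = k + 1 := by
        refine ⟨(c1 - c2 - 1).toNat, by omega, by omega⟩
      obtain ⟨k, hc2, hfuel⟩ := hk
      have hdc1 : (if c1 < c2 then (1:Int) else 0) = 0 := if_neg (by omega)
      have hdc2 : (if c2 < c1 then (1:Int) else 0) = 1 := if_pos h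
      rw [if_neg (by simp [hdc1, hdc2])]
      simp only [hdc1, hdc2]
      norm_num
      rw [hfuel]
      rw [show c1 + (-1) = c1 - 1 from by ring, hc2, cbWalk_row_neg k r1 (c1-1)]
      rw [PySem.List.pyRange_neg_one_eq_reverse]
      rw [List.map_reverse, List.reverse_reverse]
      rw [show c1 - 1 + 1 = c1 from by ring,
          min_eq_right (by omega : c1 - 1 - (k:Int) ≤ c1),
          max_eq_left (by omega : c1 - 1 - (k:Int) ≤ c1)]
  · by_cases h2 : c1 = c2
    · subst h2
      rw [if_neg h1, if_pos rfl, PySem.List.foldl_append_singleton_eq_map]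
      rcases lt_trichotomy r1 r2 with h | h | h
      · have hk : ∃ k : Nat, r2 = (r1 + 1) + (k:Int) ∧ (r2 - r1).natAbs = k + 1 := by
          refine ⟨(r2 - r1 - 1).toNat, by omega, by omega⟩
        obtain ⟨k, hr2, hfuel⟩ := hk
        have hdr1 : (if r1 < r2 then (1:Int) else 0) = 1 := if_pos h
        have hdr2 : (if r2 < r1 then (1:Int) else 0) = 0 := if_neg (by omega)
        rw [if_neg (by simp [hdr1, hdr2])]
        simp only [hdr1, hdr2]
        norm_num
        rw [hfuel, hr2, cbWalk_col_pos k c1 (r1+1)]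
        rw [min_eq_left (by omega : r1 ≤ r1 + 1 + (k:Int)),
            max_eq_right (by omega : r1 ≤ r1 + 1 + (k:Int))]
      · exact absurd h h1
      · have hk : ∃ k : Nat, r2 = (r1 - 1) - (k:Int) ∧ (r2 - r1).natAbs = k + 1 := by
          refine ⟨(r1 - r2 - 1).toNat, by omega, by omega⟩
        obtain ⟨k, hr2, hfuel⟩ := hk
        have hdr1 : (if r1 < r2 then (1:Int) else 0) = 0 := if_neg (by omega)
        have hdr2 : (if r2 < r1 then (1:Int) else 0) = 1 := if_pos h
        rw [if_neg (by simp [hdr1, hdr2])]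
        simp only [hdr1, hdr2]
        norm_num
        rw [hfuel]
        rw [show r1 + (-1) = r1 - 1 from by ring, hr2, cbWalk_col_neg k c1 (r1-1)]
        rw [PySem.List.pyRange_neg_one_eq_reverse]
        rw [List.map_reverse, List.reverse_reverse]
        rw [show r1 - 1 + 1 = r1 from by ring,
            min_eq_right (by omega : r1 - 1 - (k:Int) ≤ r1),
            max_eq_left (by omega : r1 - 1 - (k:Int) ≤ r1)]
    · have hdr : ((if r1 < r2 then (1:Int) else 0) - (if r2 < r1 then 1 else 0)) ≠ 0 := by
        rcases lt_trichotomy r1 r2 with h | h | h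
        · simp [h, not_lt.mpr h.le]
        · exact absurd h h1
        · simp [h, not_lt.mpr h.le]
      have hdc : ((if c1 < c2 then (1:Int) else 0) - (if c2 < c1 then 1 else 0)) ≠ 0 := by
        rcases lt_trichotomy c1 c2 with h | h | h
        · simp [h, not_lt.mpr h.le]
        · exact absurd h h2
        · simp [h, not_lt.mpr h.le]
      rw [if_neg h1, if_neg h2, if_pos ⟨hdr, hdc⟩]
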